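-- pv_equiv track=rewrite | github.com/gesture02/Algorithm | 백준/1062.py | solve
-- ===== SOURCE A (Python) =====
-- def count(mask, words):
--     cnt = 0
--     for word in words:
--         if word & ((1 << 26) - 1 - mask) == 0:
--             cnt += 1
--     return cnt
--
-- def solve(index, k, mask, words):
--     if k < 0:
--         return -1
--     if index == 26:
--         return count(mask, words)
--     answer = 0
--     t1 = solve(index+1, k-1, mask | (1 << index), words)
--     if answer < t1:
--         answer = t1
--     if index not in [ord('a') - ord('a'), ord('n') - ord('a'), ord('t') - ord('a'), ord('i') - ord('a'), ord('c') - ord('a')]: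
--         t2 = solve(index+1, k, mask, words)
--         if answer < t2:
--             answer = t2
--
--     return answer
-- ===== SOURCE B (Python) =====
-- def solve(index, k, mask, words):
--     if k < 0:
--         return -1
--     # breadth-first over letters: carry the set of reachable (mask, remaining-budget) states
--     full = (1 << 26) - 1
--     mandatory = (0, 2, 8, 13, 19)
--     states = [(mask, k)]
--     for i in range(index, 26):
--         new_states = []
--         for m, r in states:
--             if r > 0:
--                 new_states.append((m | (1 << i), r - 1))
--             if i not in mandatory:
--                 new_states.append((m, r))
--         states = new_states
--     best = 0
--     for m, r in states:
--         c = sum(1 for w in words if w & (full - m) == 0)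
--         if best < c:
--             best = c
--     return best
-- ===== Notes on version B (the rewrite author's own statement) =====
-- stated objective: alternative
-- what changed: Replaces A's pruned depth-first recursion over letter indices by an iterative breadth-first sweep that carries the explicit list of reachable (mask, remaining-budget) states across letters [index,26) and takes one final maximum over their word counts.
import Mathlib
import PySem

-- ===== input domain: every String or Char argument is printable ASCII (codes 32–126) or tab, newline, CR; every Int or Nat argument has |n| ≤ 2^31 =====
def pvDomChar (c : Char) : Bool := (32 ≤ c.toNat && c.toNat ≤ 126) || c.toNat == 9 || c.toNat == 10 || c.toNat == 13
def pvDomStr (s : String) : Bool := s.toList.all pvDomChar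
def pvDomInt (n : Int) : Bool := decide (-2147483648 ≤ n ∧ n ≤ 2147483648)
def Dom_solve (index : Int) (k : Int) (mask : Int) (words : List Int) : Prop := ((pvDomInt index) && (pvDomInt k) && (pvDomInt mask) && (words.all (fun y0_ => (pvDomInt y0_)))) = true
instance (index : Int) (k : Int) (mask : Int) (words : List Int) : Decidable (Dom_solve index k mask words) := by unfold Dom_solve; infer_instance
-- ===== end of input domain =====

-- B replaces A's depth-first recursion over letters by an iterative breadth-first sweep that
-- carries the list of reachable (mask, remaining-budget) states and takes one final max;
-- objective: alternative (same exponential search space, no recursion). Return values only; no mutation.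

-- ===== PORT A =====
-- count(mask, words)
def cntA (mask : Int) (words : List Int) : Int :=
  words.foldl (fun cnt word =>
    if PySem.Int.band word (((1 : Int) <<< 26) - 1 - mask) = 0 then cnt + 1 else cnt) 0

-- fuel = (26 - index).toNat; within Pre_ the Python recursion reaches index = 26 exactly when
-- the fuel runs out, so the fuel-0 branch (value 0) is never taken on admitted inputs.
-- '1 << index' is ported as (1 : Int) <<< index.toNat: exact for 0 ≤ index (Pre_ guarantees
-- that on every path where the shift is evaluated; Python raises on index < 0).
def solveF (fuel : Nat) (index : Int) (k : Int) (mask : Int) (words : List Int) : Int :=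
  if k < 0 then -1
    else if index = 26 then cntA mask words
    else
      match fuel with
      | 0 => 0
      | f + 1 =>
        let t1 := solveF f (index + 1) (k - 1) (PySem.Int.bor mask ((1 : Int) <<< index.toNat)) words
        let answer : Int := if 0 < t1 then t1 else 0
        if index ∈ ([0, 13, 19, 8, 2] : List Int) then answer
        else
          let t2 := solveF f (index + 1) k mask words
          if answer < t2 then t2 else answer

def solve (index : Int) (k : Int) (mask : Int) (words : List Int) : Int :=
  solveF (26 - index).toNat index k mask words

-- ===== PORT B =====
-- one breadth-first step: extend every reachable state by letter i (take it if budget remains;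
-- also keep it unchanged if i is not mandatory)
def stepB (i : Int) (states : List (Int × Int)) : List (Int × Int) :=
  states.foldl (fun ns s =>
    let ns := if 0 < s.2 then ns ++ [(PySem.Int.bor s.1 ((1 : Int) <<< i.toNat), s.2 - 1)] else ns
    if i ∈ ([0, 2, 8, 13, 19] : List Int) then ns else ns ++ [s]) []

def solve_alt (index : Int) (k : Int) (mask : Int) (words : List Int) : Int :=
  if k < 0 then -1
  else
    let full : Int := ((1 : Int) <<< 26) - 1
    let states := (PySem.List.pyRange index 26 1).foldl (fun st i => stepB i st) [(mask, k)]
    states.foldl (fun best s =>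
      let c := words.foldl (fun c w =>
        if PySem.Int.band w (full - s.1) = 0 then c + 1 else c) 0
      if best < c then c else best) 0

-- ===== PRECONDITION & SPEC =====
-- Pre_ excludes only inputs on which the Python A raises: with k ≥ 0, index < 0 raises
-- ValueError (1 << negative) and index > 26 never reaches the base case (RecursionError);
-- with k < 0 A returns -1 for any index, so those inputs stay inside.
def Pre_solve (index : Int) (k : Int) (mask : Int) (words : List Int) : Prop :=
  k < 0 ∨ (0 ≤ index ∧ index ≤ 26)
instance (index : Int) (k : Int) (mask : Int) (words : List Int) : Decidable (Pre_solve index k mask words) := by unfold Pre_solve; infer_instance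

def pvWitness_solve : Int × Int × Int × List Int := (0, 5, 0, [1, 5, 4194304])

def Spec_solve (index : Int) (k : Int) (mask : Int) (words : List Int) (out : Int) : Prop := out = solve_alt index k mask words
instance (index : Int) (k : Int) (mask : Int) (words : List Int) (out : Int) : Decidable (Spec_solve index k mask words out) := by unfold Spec_solve; infer_instance

-- ===== CLAIM (what is proved, stated in full; the proofs are below) =====
def Claim_equal_solve : Prop := ∀ (index : Int) (k : Int) (mask : Int) (words : List Int), Dom_solve index k mask words → Pre_solve index k mask words → Spec_solve index k mask words (solve index k mask words)

-- ===== LEMMAS AND PROOFS =====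

-- the per-state successor list of one breadth-first step
def gB (i : Int) (s : Int × Int) : List (Int × Int) :=
  (if 0 < s.2 then [(PySem.Int.bor s.1 ((1 : Int) <<< i.toNat), s.2 - 1)] else []) ++
  (if i ∈ ([0, 2, 8, 13, 19] : List Int) then [] else [s])

-- the whole sweep and the value of a state list
def sweep (L : List Int) (S : List (Int × Int)) : List (Int × Int) :=
  L.foldl (fun st i => stepB i st) S

def mv (words : List Int) (S : List (Int × Int)) : Int :=
  (S.map (fun s => cntA s.1 words)).foldl max 0

lemma stepB_eq_flatMap (i : Int) (S : List (Int × Int)) : stepB i S = S.flatMap (gB i) := by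
  have h : ∀ acc, S.foldl (fun ns s =>
      let ns := if 0 < s.2 then ns ++ [(PySem.Int.bor s.1 ((1 : Int) <<< i.toNat), s.2 - 1)] else ns
      if i ∈ ([0, 2, 8, 13, 19] : List Int) then ns else ns ++ [s]) acc = acc ++ S.flatMap (gB i) := by
    induction S with
    | nil => intro acc; simp
    | cons s S ih =>
      intro acc
      simp only [List.foldl_cons, List.flatMap_cons, ih]
      have : (let ns := if 0 < s.2 then acc ++ [(PySem.Int.bor s.1 ((1 : Int) <<< i.toNat), s.2 - 1)] else acc
          if i ∈ ([0, 2, 8, 13, 19] : List Int) then ns else ns ++ [s]) = acc ++ gB i s := by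
        simp only [gB]; split_ifs <;> simp
      rw [this, List.append_assoc]
  exact h []

lemma sweep_nil (S : List (Int × Int)) : sweep [] S = S := rfl

lemma sweep_cons (i : Int) (L : List Int) (S : List (Int × Int)) :
    sweep (i :: L) S = sweep L (stepB i S) := rfl

lemma sweep_append_states (L : List Int) (A B : List (Int × Int)) :
    sweep L (A ++ B) = sweep L A ++ sweep L B := by
  induction L generalizing A B with
  | nil => rfl
  | cons i L ih =>
    simp only [sweep_cons, stepB_eq_flatMap, List.flatMap_append]
    exact ih _ _

lemma cntA_nonneg (mask : Int) (words : List Int) : 0 ≤ cntA mask words := by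
  unfold cntA
  have h : ∀ (l : List Int) (b : Int), 0 ≤ b →
      0 ≤ l.foldl (fun cnt word =>
        if PySem.Int.band word (((1 : Int) <<< 26) - 1 - mask) = 0 then cnt + 1 else cnt) b := by
    intro l
    induction l with
    | nil => intro b hb; simpa using hb
    | cons w l ih => intro b hb; simp only [List.foldl_cons]; split_ifs <;> exact ih _ (by omega)
  exact h words 0 le_rfl

lemma foldl_max_shift (l : List Int) (a b : Int) :
    l.foldl max (max a b) = max a (l.foldl max b) := by
  induction l generalizing b with
  | nil => rfl
  | cons x l ih => simp only [List.foldl_cons, max_assoc, ih]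

lemma mv_nonneg (words : List Int) (S : List (Int × Int)) : 0 ≤ mv words S := by
  unfold mv
  have : ∀ (l : List Int) (b : Int), b ≤ l.foldl max b := by
    intro l
    induction l with
    | nil => intro b; exact le_rfl
    | cons x l ih => intro b; exact le_trans (le_max_left b x) (ih _)
  exact this _ 0

lemma mv_append (words : List Int) (A B : List (Int × Int)) :
    mv words (A ++ B) = max (mv words A) (mv words B) := by
  unfold mv
  rw [List.map_append, List.foldl_append]
  have h0 : (0 : Int) ≤ (List.map (fun s => cntA s.1 words) A).foldl max 0 := mv_nonneg words A
  calc (List.map (fun s => cntA s.1 words) B).foldl max ((List.map (fun s => cntA s.1 words) A).foldl max 0)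
      = (List.map (fun s => cntA s.1 words) B).foldl max
          (max ((List.map (fun s => cntA s.1 words) A).foldl max 0) 0) := by
        rw [max_eq_left h0]
    _ = _ := foldl_max_shift _ _ _

lemma mv_singleton (words : List Int) (s : Int × Int) :
    mv words [s] = cntA s.1 words := by
  unfold mv
  simp [max_eq_right (cntA_nonneg s.1 words)]

lemma sweep_empty_states (L : List Int) : sweep L [] = [] := by
  induction L with
  | nil => rfl
  | cons i L ih => simpa [sweep_cons, stepB] using ih

lemma if_lt_eq_max (a t : Int) : (if a < t then t else a) = max a t := by
  rcases (by omega : t ≤ a ∨ a < t) with h | h <;> simp [max_def] <;> omega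

lemma solveF_dead (words : List Int) (n : Nat) (index k mask : Int) (hk : k < 0) :
    solveF n index k mask words = -1 := by
  rw [solveF.eq_def, if_pos hk]

-- the core correspondence: A's pruned depth-first recursion computes the max count
-- over the states of B's breadth-first sweep
lemma solveF_eq_mv (words : List Int) : ∀ (n : Nat) (index k mask : Int),
    0 ≤ index → index + n = 26 → 0 ≤ k →
    solveF n index k mask words = mv words (sweep (PySem.List.pyRange index 26 1) [(mask, k)]) := by
  intro n
  induction n with
  | zero =>
    intro index k mask _ hend hk
    have h26 : index = 26 := by omega
    subst h26
    rw [PySem.List.pyRange_one_eq_nil (by omega), sweep_nil, mv_singleton,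
      solveF.eq_def, if_neg (by omega), if_pos rfl]
  | succ n ih =>
    intro index k mask hix hend hk
    have hlt : index < 26 := by omega
    rw [PySem.List.pyRange_one_cons hlt, sweep_cons, stepB_eq_flatMap]
    simp only [List.flatMap_cons, List.flatMap_nil, List.append_nil, gB]
    conv_lhs => rw [solveF.eq_def]
    rw [if_neg (by omega), if_neg (by omega)]
    simp only [if_lt_eq_max]
    by_cases hmand : index ∈ ([0, 13, 19, 8, 2] : List Int)
    · -- mandatory letter: only the 'take' branch
      have hmand' : index ∈ ([0, 2, 8, 13, 19] : List Int) := by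
        fin_cases hmand <;> simp
      rw [if_pos hmand, if_pos hmand', List.append_nil]
      by_cases hk0 : 0 < k
      · rw [if_pos hk0,
          ih (index + 1) (k - 1) (PySem.Int.bor mask ((1 : Int) <<< index.toNat)) (by omega) (by omega) (by omega)]
        exact max_eq_right (mv_nonneg _ _)
      · rw [if_neg hk0, solveF_dead words n _ _ _ (by omega), sweep_empty_states]
        simp [mv]
    · -- optional letter: both branches
      have hmand' : index ∉ ([0, 2, 8, 13, 19] : List Int) := by
        intro h; apply hmand; fin_cases h <;> simp
      rw [if_neg hmand', if_neg hmand,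
        ih (index + 1) k mask (by omega) (by omega) hk]
      by_cases hk0 : 0 < k
      · rw [if_pos hk0, sweep_append_states, mv_append,
          ih (index + 1) (k - 1) (PySem.Int.bor mask ((1 : Int) <<< index.toNat)) (by omega) (by omega) (by omega)]
        have h1 := mv_nonneg words (sweep (PySem.List.pyRange (index + 1) 26 1) [(PySem.Int.bor mask ((1 : Int) <<< index.toNat), k - 1)])
        generalize mv words (sweep (PySem.List.pyRange (index + 1) 26 1) [(PySem.Int.bor mask ((1 : Int) <<< index.toNat), k - 1)]) = a at *
        generalize mv words (sweep (PySem.List.pyRange (index + 1) 26 1) [(mask, k)]) = b at *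
        rw [max_comm (0 : Int) a, max_eq_left h1]
      · rw [if_neg hk0, solveF_dead words n _ _ _ (by omega), List.nil_append]
        have h2 := mv_nonneg words (sweep (PySem.List.pyRange (index + 1) 26 1) [(mask, k)])
        generalize mv words (sweep (PySem.List.pyRange (index + 1) 26 1) [(mask, k)]) = b at *
        rw [show max (0 : Int) (-1) = 0 from rfl, max_comm (0 : Int) b, max_eq_left h2]

-- B's final loop is a max-fold over the counts of the states
lemma bestOf_eq_foldl_max (words : List Int) (S : List (Int × Int)) (b : Int) :
    S.foldl (fun best s =>
      let c := words.foldl (fun c w =>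
        if PySem.Int.band w (((1 : Int) <<< 26) - 1 - s.1) = 0 then c + 1 else c) 0
      if best < c then c else best) b
      = (S.map (fun s => cntA s.1 words)).foldl max b := by
  induction S generalizing b with
  | nil => rfl
  | cons s S ih =>
    simp only [List.foldl_cons, List.map_cons, ih]
    congr 1
    exact if_lt_eq_max b (cntA s.1 words)

-- ===== VERDICT (by name: the statement is the Claim_ definition above) =====
theorem solve_spec : Claim_equal_solve := by
  intro index k mask words _ hpre
  unfold Spec_solve solve solve_alt
  by_cases hk : k < 0
  · rw [if_pos hk]
    rw [solveF.eq_def, if_pos hk]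
  · rw [if_neg hk]
    have hidx : 0 ≤ index ∧ index ≤ 26 := by
      rcases hpre with h | h
      · omega
      · exact h
    simp only []
    rw [bestOf_eq_foldl_max]
    have := solveF_eq_mv words (26 - index).toNat index k mask hidx.1 (by omega) (by omega)
    rw [this]
    rfl
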